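-- pv_equiv track=rewrite | github.com/post2web/nbloader | nbloader/utils.py | get_tag_index
-- ===== SOURCE A (Python) =====
-- def get_tag_index(cells, tag, end=False, strict=False):
--     '''Get the index of the first (or last) occurrence of a tag.'''
--     if isinstance(tag, str):
--         tag = (tag,)
--
--     try:
--         return (next(i for i, cell in enumerate(cells)
--                      if all(t in cell['tags'] for t in tag))
--                 if not end else
--                 -next(i for i, cell in enumerate(cells[::-1])
--                       if all(t in cell['tags'] for t in tag))
--                ) or None
--     except StopIteration:
--         assert not strict, 'Tag "{}" found'.format(tag)
--         return None
-- ===== SOURCE B (Python) =====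
-- def get_tag_index(cells, tag, end=False, strict=False):
--     '''Get the index of the first (or last) occurrence of a tag.'''
--     if isinstance(tag, str):
--         tag = (tag,)
--     matches = [i for i, cell in enumerate(cells)
--                if all(t in cell['tags'] for t in tag)]
--     if not matches:
--         assert not strict, 'Tag "{}" found'.format(tag)
--         return None
--     idx = matches[0] if not end else -(len(cells) - 1 - matches[-1])
--     return idx or None
-- ===== Notes on version B (the rewrite author's own statement) =====
-- stated objective: alternative
-- what changed: One eager forward pass collects all matching indices; first/last selection and the negative end-index are then computed arithmetically (-(len(cells)-1-last)), replacing A's two lazy next() generator scans (one over cells, one over cells[::-1]) and its try/except StopIteration control flow.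
-- outside the precondition, e.g. on get_tag_index([{'tags': ['x']}, {}], 'x', False, False): A returns None, B raises KeyError; on get_tag_index([], 'x', False, True): A raises AssertionError, B raises AssertionError
import Mathlib
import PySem

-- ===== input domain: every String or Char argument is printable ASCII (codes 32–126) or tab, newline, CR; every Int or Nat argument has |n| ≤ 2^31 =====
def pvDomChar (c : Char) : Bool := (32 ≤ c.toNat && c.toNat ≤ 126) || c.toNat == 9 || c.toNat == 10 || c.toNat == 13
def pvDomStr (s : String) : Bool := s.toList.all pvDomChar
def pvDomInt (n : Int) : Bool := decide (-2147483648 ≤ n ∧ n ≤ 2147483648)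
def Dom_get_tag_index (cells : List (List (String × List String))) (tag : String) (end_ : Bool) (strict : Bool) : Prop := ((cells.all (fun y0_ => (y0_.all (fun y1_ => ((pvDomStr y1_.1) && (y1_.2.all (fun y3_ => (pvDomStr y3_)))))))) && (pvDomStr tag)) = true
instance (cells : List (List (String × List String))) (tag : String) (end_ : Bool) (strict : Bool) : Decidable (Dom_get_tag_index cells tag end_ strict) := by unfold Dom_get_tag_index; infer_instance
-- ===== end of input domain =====

-- B replaces A's two lazy next() generator scans (forward, and over cells[::-1]) by one eager
-- pass collecting all matching indices, selecting first/last arithmetically; same result.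

-- ===== PORT A =====
-- all(t in cell['tags'] for t in tag) after tag = (tag,); cell['tags'] is assoc-list first-match
-- lookup (KeyError = none; such inputs are excluded by Pre_, the port yields false there).
def pvHasAllA (tag : String) (cell : List (String × List String)) : Bool :=
  [tag].all (fun t =>
    match cell.lookup "tags" with
    | some ts => ts.contains t
    | none => false)

-- next(i for i, cell in enumerate(xs) if …): first index satisfying the check (none = StopIteration)
def pvNextA (tag : String) : List (List (String × List String)) → Nat → Option Nat
  | [], _ => none
  | c :: cs, i => if pvHasAllA tag c then some i else pvNextA tag cs (i + 1)

def get_tag_index (cells : List (List (String × List String))) (tag : String) (end_ : Bool) (strict : Bool) : Option Int :=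
  -- cells[::-1] ported as List.reverse (exact for a list and step -1)
  let r : Option Int :=
    if !end_ then (pvNextA tag cells 0).map (fun i => (i : Int))
    else (pvNextA tag cells.reverse 0).map (fun i => -((i : Int)))
  -- `… or None`: a 0 result collapses to None; on StopIteration with strict the Python raises
  -- AssertionError (excluded by Pre_), otherwise returns None.
  match r with
  | some v => if v = 0 then none else some v
  | none => none

-- ===== PORT B =====
def pvHasAllB (tag : String) (cell : List (String × List String)) : Bool :=
  [tag].all (fun t => ((cell.lookup "tags").getD []).contains t)

def get_tag_index_alt (cells : List (List (String × List String))) (tag : String) (end_ : Bool) (strict : Bool) : Option Int :=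
  -- matches = [i for i, cell in enumerate(cells) if all(t in cell['tags'] for t in tag)]
  let ms : List Nat := ((cells.zipIdx).filter (fun p => pvHasAllB tag p.1)).map (fun p => p.2)
  match ms with
  | [] => none   -- assert-not-strict path: strict with no match is excluded by Pre_
  | m :: rest =>
    let idx : Int :=
      if !end_ then (m : Int)
      else -(((cells.length : Int) - 1 - (((m :: rest).getLast?.getD 0) : Int)))
    if idx = 0 then none else some idx

-- ===== PRECONDITION & SPEC =====
-- Pre_ excludes (a) cells missing a 'tags' key: A raises KeyError when its lazy scan reaches such a
-- cell but can also return before reaching it, while B's eager pass always raises there; and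
-- (b) strict=True with no matching cell, where A raises AssertionError.
def Pre_get_tag_index (cells : List (List (String × List String))) (tag : String) (end_ : Bool) (strict : Bool) : Prop :=
  (∀ cell ∈ cells, (cell.lookup "tags").isSome) ∧
  (strict = true → ∃ cell ∈ cells, tag ∈ (cell.lookup "tags").getD [])
instance (cells : List (List (String × List String))) (tag : String) (end_ : Bool) (strict : Bool) : Decidable (Pre_get_tag_index cells tag end_ strict) := by unfold Pre_get_tag_index; infer_instance

def pvWitness_get_tag_index : (List (List (String × List String))) × String × Bool × Bool :=
  ([[("tags", ["a"])], [("tags", [])]], "a", false, true)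

def Spec_get_tag_index (cells : List (List (String × List String))) (tag : String) (end_ : Bool) (strict : Bool) (out : Option Int) : Prop := out = get_tag_index_alt cells tag end_ strict
instance (cells : List (List (String × List String))) (tag : String) (end_ : Bool) (strict : Bool) (out : Option Int) : Decidable (Spec_get_tag_index cells tag end_ strict out) := by unfold Spec_get_tag_index; infer_instance

-- ===== CLAIM (what is proved, stated in full; the proofs are below) =====
def Claim_equal_get_tag_index : Prop := ∀ (cells : List (List (String × List String))) (tag : String) (end_ : Bool) (strict : Bool), Dom_get_tag_index cells tag end_ strict → Pre_get_tag_index cells tag end_ strict → Spec_get_tag_index cells tag end_ strict (get_tag_index cells tag end_ strict)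

-- ===== LEMMAS AND PROOFS =====

-- the two membership helpers agree
theorem pvHasAll_eq (tag : String) (cell : List (String × List String)) :
    pvHasAllB tag cell = pvHasAllA tag cell := by
  simp only [pvHasAllA, pvHasAllB]
  cases cell.lookup "tags" <;> simp

-- A's forward scan is the head of the eager match list
theorem pvNextA_eq_head (tag : String) (l : List (List (String × List String))) (n : Nat) :
    pvNextA tag l n = (((l.zipIdx n).filter (fun p => pvHasAllA tag p.1)).map (fun p => p.2)).head? := by
  induction l generalizing n with
  | nil => simp [pvNextA]
  | cons c cs ih =>
    simp only [pvNextA, List.zipIdx_cons, List.filter_cons]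
    by_cases h : pvHasAllA tag c = true
    · simp [h]
    · simp only [h, Bool.false_eq_true, if_false]
      simpa [h] using ih (n + 1)

-- every collected index is a genuine position
theorem matchIdx_lt (tag : String) (l : List (List (String × List String))) (i : Nat)
    (h : i ∈ ((l.zipIdx).filter (fun p => pvHasAllA tag p.1)).map (fun p => p.2)) :
    i < l.length := by
  rcases List.mem_map.1 h with ⟨p, hp, rfl⟩
  exact List.snd_lt_of_mem_zipIdx (List.mem_of_mem_filter hp)

-- the start index of A's scan is a pure offset
theorem pvNextA_offset (tag : String) (l : List (List (String × List String))) (n : Nat) :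
    pvNextA tag l n = (pvNextA tag l 0).map (fun i => i + n) := by
  induction l generalizing n with
  | nil => simp [pvNextA]
  | cons c cs ih =>
    by_cases h : pvHasAllA tag c = true
    · simp [pvNextA, h]
    · simp only [pvNextA, h, Bool.false_eq_true, if_false]
      rw [ih (n + 1), ih 1]
      cases pvNextA tag cs 0 <;> simp
      omega

-- A's reversed scan is the last of the eager match list, re-indexed from the right
theorem pvNextA_reverse (tag : String) (l : List (List (String × List String))) :
    pvNextA tag l.reverse 0 =
      ((((l.zipIdx).filter (fun p => pvHasAllA tag p.1)).map (fun p => p.2)).getLast?).map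
        (fun i => l.length - 1 - i) := by
  induction l using List.reverseRecOn with
  | nil => simp [pvNextA]
  | append_singleton l c ih =>
    rw [List.reverse_append, List.reverse_singleton, List.singleton_append]
    simp only [pvNextA]
    by_cases h : pvHasAllA tag c = true
    · simp [h, List.zipIdx_append, List.filter_append]
    · rw [if_neg h, pvNextA_offset, ih]
      have hms : (((l ++ [c]).zipIdx).filter (fun p => pvHasAllA tag p.1)).map (fun p => p.2)
          = ((l.zipIdx).filter (fun p => pvHasAllA tag p.1)).map (fun p => p.2) := by
        simp [List.zipIdx_append, List.filter_append, h]
      rw [hms]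
      cases hl : (((l.zipIdx).filter (fun p => pvHasAllA tag p.1)).map (fun p => p.2)).getLast? with
      | none => simp
      | some i =>
        have hi : i < l.length := by
          apply matchIdx_lt tag l i
          exact List.mem_of_getLast? hl
        simp only [Option.map_some, List.length_append, List.length_cons, List.length_nil]
        congr 1
        omega

-- ===== VERDICT (by name: the statement is the Claim_ definition above) =====
theorem get_tag_index_spec : Claim_equal_get_tag_index := by
  intro cells tag end_ strict _ _
  unfold Spec_get_tag_index get_tag_index get_tag_index_alt
  simp only [pvHasAll_eq]
  cases end_ with
  | false =>
    rw [pvNextA_eq_head tag cells 0]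
    cases hms : ((cells.zipIdx).filter (fun p => pvHasAllA tag p.1)).map (fun p => p.2) with
    | nil => simp
    | cons m rest => simp
  | true =>
    rw [pvNextA_reverse tag cells]
    cases hms : ((cells.zipIdx).filter (fun p => pvHasAllA tag p.1)).map (fun p => p.2) with
    | nil => simp
    | cons m rest =>
      have hne : (m :: rest) ≠ ([] : List Nat) := by simp
      have hlast : (m :: rest).getLast? = some ((m :: rest).getLast hne) :=
        List.getLast?_eq_some_getLast hne
      have hlt : (m :: rest).getLast hne < cells.length := by
        apply matchIdx_lt tag cells
        rw [hms]; exact List.getLast_mem hne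
      have hcast : (↑(cells.length - 1 - (m :: rest).getLast hne) : Int)
          = (cells.length : Int) - 1 - ((m :: rest).getLast hne : Int) := by omega
      simp [hlast]
      split_ifs with h1 h2
      · rfl
      · exfalso; omega
      · exfalso; omega
      · simp only [Option.some.injEq]; omega
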